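-- pv_equiv track=rewrite | github.com/ababilone/Diematic_to_MQTT | src/Diematic.py | _decodeScheduleDay
-- ===== SOURCE A (Python) =====
-- def _decodeScheduleDay(reg0, reg1, reg2):
-- 	regs = [reg0 & 0xFFFF, reg1 & 0xFFFF, reg2 & 0xFFFF];
-- 	def slot_on(s):
-- 		return (regs[s // 16] >> (15 - (s % 16))) & 1;
-- 	periods = [];
-- 	start = None;
-- 	for i in range(49):
-- 		on = slot_on(i) if i < 48 else 0;
-- 		if on and start is None:
-- 			start = i;
-- 		elif not on and start is not None:
-- 			h_s, m_s = divmod(start, 2);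
-- 			h_e, m_e = divmod(i, 2);
-- 			periods.append(f"{h_s:02d}:{m_s*30:02d}-{h_e:02d}:{m_e*30:02d}");
-- 			start = None;
-- 	return ', '.join(periods) if periods else 'off';
-- ===== SOURCE B (Python) =====
-- def _decodeScheduleDay(reg0, reg1, reg2):
--     regs = (reg0 & 0xFFFF, reg1 & 0xFFFF, reg2 & 0xFFFF)
--     bits = [(regs[s // 16] >> (15 - (s % 16))) & 1 for s in range(48)]
--     periods = []
--     i = 0
--     while i < 48:
--         j = i
--         while j < 48 and bits[j] == bits[i]:
--             j += 1
--         if bits[i]: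
--             h_s, m_s = divmod(i, 2)
--             h_e, m_e = divmod(j, 2)
--             periods.append(f"{h_s:02d}:{m_s*30:02d}-{h_e:02d}:{m_e*30:02d}")
--         i = j
--     return ', '.join(periods) if periods else 'off'
-- ===== Notes on version B (the rewrite author's own statement) =====
-- stated objective: alternative
-- what changed: Replaces A's 49-step sentinel (start=None) state machine with a two-phase pass: materialise the 48 slot bits once, then run-length scan equal-bit groups with a cursor, emitting one period per group of ones.
import Mathlib
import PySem

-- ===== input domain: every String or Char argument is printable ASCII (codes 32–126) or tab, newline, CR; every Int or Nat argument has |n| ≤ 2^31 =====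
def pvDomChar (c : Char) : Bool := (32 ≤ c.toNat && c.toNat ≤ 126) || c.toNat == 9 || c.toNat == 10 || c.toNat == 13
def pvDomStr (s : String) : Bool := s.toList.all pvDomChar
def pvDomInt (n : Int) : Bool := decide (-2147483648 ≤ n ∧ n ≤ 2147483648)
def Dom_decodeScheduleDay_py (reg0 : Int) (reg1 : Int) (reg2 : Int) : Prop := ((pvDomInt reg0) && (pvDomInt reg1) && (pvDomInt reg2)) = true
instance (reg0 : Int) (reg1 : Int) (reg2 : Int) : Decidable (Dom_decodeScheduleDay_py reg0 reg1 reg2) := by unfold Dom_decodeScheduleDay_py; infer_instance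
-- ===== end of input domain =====

-- B replaces A's sentinel-driven start-tracking loop by a run-length grouping pass over a
-- materialised 48-bit slot list (objective: alternative decomposition, same cost).

-- shared formatting helpers (both Pythons contain the identical f-string / divmod lines)
-- f"{n:02d}" : zero-pad to width 2 = str(n).zfill(2)  (exact: sign stays in front in both)
def pvFmt2 (n : Int) : String := PySem.Str.zfill (PySem.Int.toStr n) 2

-- divmod(start,2)/divmod(i,2) and the f-string "HH:MM-HH:MM" (divisor 2 > 0, never raises)
def pvFmtPeriod (s i : Int) : String :=
  pvFmt2 (PySem.Int.floordiv s 2) ++ ":" ++ pvFmt2 (PySem.Int.mod s 2 * 30) ++ "-" ++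
  pvFmt2 (PySem.Int.floordiv i 2) ++ ":" ++ pvFmt2 (PySem.Int.mod i 2 * 30)

-- ===== PORT A =====
-- the body of A's for-loop (onFn is the 'slot_on(i) if i < 48 else 0' expression)
def pvStepA (onFn : Int → Int) (st : List String × Option Int) (i : Int) :
    List String × Option Int :=
  let on := onFn i
  if on ≠ 0 ∧ st.2 = none then (st.1, some i)
  else if on = 0 ∧ st.2 ≠ none then (st.1 ++ [pvFmtPeriod (st.2.getD 0) i], none)
  else st

-- slot_on: regs index s//16 is always in range (s ∈ 0..47); shift amount 15-(s%16) ∈ 0..15 (.toNat exact)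
def pvSlotOn (regs : List Int) (s : Int) : Int :=
  PySem.Int.band
    ((PySem.List.pyGetD regs (PySem.Int.floordiv s 16) 0) >>> (15 - PySem.Int.mod s 16).toNat) 1

def decodeScheduleDay_py (reg0 : Int) (reg1 : Int) (reg2 : Int) : String :=
  let regs : List Int :=
    [PySem.Int.band reg0 0xFFFF, PySem.Int.band reg1 0xFFFF, PySem.Int.band reg2 0xFFFF]
  let r := (PySem.List.pyRange 0 49 1).foldl
    (pvStepA (fun i => if i < 48 then pvSlotOn regs i else 0)) ([], none)
  if r.1 = [] then "off" else PySem.Str.join ", " r.1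

-- ===== PORT B =====
-- B's outer while: scan the run of elements equal to the head (inner while j), emit a period
-- for a run of ones, advance the cursor by the run length.
def pvScanRuns : List Int → Int → List String
  | [], _ => []
  | b :: rest, cur =>
    let t := rest.takeWhile (fun x => x == b)
    let rest' := rest.dropWhile (fun x => x == b)
    let j : Int := cur + 1 + t.length
    if b ≠ 0 then pvFmtPeriod cur j :: pvScanRuns rest' j else pvScanRuns rest' j
  termination_by l => l.length
  decreasing_by
    · simpa using Nat.lt_succ_of_le (List.length_dropWhile_le _ _)
    · simpa using Nat.lt_succ_of_le (List.length_dropWhile_le _ _)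

def decodeScheduleDay_py_alt (reg0 : Int) (reg1 : Int) (reg2 : Int) : String :=
  let regs : List Int :=
    [PySem.Int.band reg0 0xFFFF, PySem.Int.band reg1 0xFFFF, PySem.Int.band reg2 0xFFFF]
  let bits := (PySem.List.pyRange 0 48 1).map (pvSlotOn regs)
  let periods := pvScanRuns bits 0
  if periods = [] then "off" else PySem.Str.join ", " periods

-- ===== PRECONDITION & SPEC =====
def Spec_decodeScheduleDay_py (reg0 : Int) (reg1 : Int) (reg2 : Int) (out : String) : Prop := out = decodeScheduleDay_py_alt reg0 reg1 reg2
instance (reg0 : Int) (reg1 : Int) (reg2 : Int) (out : String) : Decidable (Spec_decodeScheduleDay_py reg0 reg1 reg2 out) := by unfold Spec_decodeScheduleDay_py; infer_instance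

-- ===== CLAIM (what is proved, stated in full; the proofs are below) =====
def Claim_equal_decodeScheduleDay_py : Prop := ∀ (reg0 : Int) (reg1 : Int) (reg2 : Int), Dom_decodeScheduleDay_py reg0 reg1 reg2 → Spec_decodeScheduleDay_py reg0 reg1 reg2 (decodeScheduleDay_py reg0 reg1 reg2)

-- ===== LEMMAS AND PROOFS =====

-- proof-side restatement of A's loop as a structural recursion over the on-values
def pvALoop : List Int → Int → Option Int → List String → List String
  | [], _, _, acc => acc
  | on :: rest, cur, start, acc =>
    if on ≠ 0 ∧ start = none then pvALoop rest (cur + 1) (some cur) acc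
    else if on = 0 ∧ start ≠ none then
      pvALoop rest (cur + 1) none (acc ++ [pvFmtPeriod (start.getD 0) cur])
    else pvALoop rest (cur + 1) start acc

lemma pvScanRuns_zero_cons (rest : List Int) (cur : Int) :
    pvScanRuns ((0 : Int) :: rest) cur = pvScanRuns rest (cur + 1) := by
  cases rest with
  | nil => simp [pvScanRuns]
  | cons x r2 =>
    by_cases hx : x = 0
    · subst hx
      simp only [pvScanRuns, List.takeWhile, List.dropWhile]
      norm_num
      ring_nf
    · have hx' : (x == (0:Int)) = false := by simp [hx]
      simp [pvScanRuns, List.takeWhile, List.dropWhile, hx']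

lemma pvBridge (f : Int → Int) : ∀ (n : Nat) (c : Int) (acc : List String) (start : Option Int),
    ((PySem.List.pyRange c (c + n) 1).foldl (pvStepA f) (acc, start)).1
      = pvALoop ((PySem.List.pyRange c (c + n) 1).map f) c start acc := by
  intro n
  induction n with
  | zero =>
    intro c acc start
    simp [pvALoop]
  | succ n ih =>
    intro c acc start
    rw [PySem.List.pyRange_one_cons (by push_cast; omega : c < c + ((n:Nat)+1:Nat))]
    have h2 : c + ((n:Nat)+1:Nat) = (c+1) + (n:Nat) := by push_cast; ring
    rw [h2]
    simp only [List.foldl_cons, List.map_cons]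
    show ((PySem.List.pyRange (c+1) (c+1+(n:Nat)) 1).foldl (pvStepA f) (pvStepA f (acc, start) c)).1
      = pvALoop (f c :: (PySem.List.pyRange (c+1) (c+1+(n:Nat)) 1).map f) c start acc
    simp only [pvStepA, pvALoop]
    split_ifs with h1 h2'
    · exact ih (c+1) acc (some c)
    · exact ih (c+1) (acc ++ [pvFmtPeriod (start.getD 0) c]) none
    · exact ih (c+1) acc start

lemma pvSlotOn_bit (regs : List Int) (s : Int) : pvSlotOn regs s = 0 ∨ pvSlotOn regs s = 1 := by
  unfold pvSlotOn
  rw [PySem.Int.band_one]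
  have h1 := PySem.Int.mod_nonneg ((PySem.List.pyGetD regs (PySem.Int.floordiv s 16) 0) >>> (15 - PySem.Int.mod s 16).toNat) (by norm_num : (0:Int) < 2)
  have h2 := PySem.Int.mod_lt ((PySem.List.pyGetD regs (PySem.Int.floordiv s 16) 0) >>> (15 - PySem.Int.mod s 16).toNat) (by norm_num : (0:Int) < 2)
  omega

lemma pvMain : ∀ (bits : List Int), (∀ b ∈ bits, b = 0 ∨ b = 1) →
    (∀ (cur : Int) (acc : List String),
      pvALoop (bits ++ [0]) cur none acc = acc ++ pvScanRuns bits cur)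
    ∧ (∀ (cur s : Int) (acc : List String),
      pvALoop (bits ++ [0]) cur (some s) acc =
        acc ++ pvFmtPeriod s (cur + (bits.takeWhile (fun x => x == (1:Int))).length)
          :: pvScanRuns (bits.dropWhile (fun x => x == (1:Int)))
              (cur + (bits.takeWhile (fun x => x == (1:Int))).length)) := by
  intro bits
  induction bits with
  | nil =>
    intro _
    constructor
    · intro cur acc; simp [pvALoop, pvScanRuns]
    · intro cur s acc; simp [pvALoop, pvScanRuns]
  | cons b rest ih =>
    intro hgood
    have hrest := ih (fun x hx => hgood x (List.mem_cons_of_mem _ hx))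
    rcases hgood b (List.mem_cons_self) with hb | hb
    · -- b = 0
      subst hb
      constructor
      · intro cur acc
        simp only [List.cons_append, pvALoop]
        norm_num
        rw [hrest.1 (cur+1) acc, pvScanRuns_zero_cons]
      · intro cur s acc
        simp only [List.cons_append, pvALoop]
        norm_num
        rw [hrest.1 (cur+1) (acc ++ [pvFmtPeriod s cur])]
        simp [pvScanRuns_zero_cons]
    · -- b = 1
      subst hb
      constructor
      · intro cur acc
        simp only [List.cons_append, pvALoop]
        norm_num
        rw [hrest.2 (cur+1) cur acc]
        simp [pvScanRuns]
      · intro cur s acc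
        simp only [List.cons_append, pvALoop]
        norm_num
        rw [hrest.2 (cur+1) s acc]
        ring_nf
        simp


-- the shared computational core: A's fold equals B's run scan, for any regs list
lemma pvCore (regs : List Int) :
    (if ((PySem.List.pyRange 0 49 1).foldl
          (pvStepA (fun i => if i < 48 then pvSlotOn regs i else 0)) ([], none)).1 = ([] : List String)
     then "off"
     else PySem.Str.join ", " ((PySem.List.pyRange 0 49 1).foldl
          (pvStepA (fun i => if i < 48 then pvSlotOn regs i else 0)) ([], none)).1)
    = (if pvScanRuns ((PySem.List.pyRange 0 48 1).map (pvSlotOn regs)) 0 = ([] : List String)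
       then "off"
       else PySem.Str.join ", " (pvScanRuns ((PySem.List.pyRange 0 48 1).map (pvSlotOn regs)) 0)) := by
  have hkey : ((PySem.List.pyRange 0 49 1).foldl
      (pvStepA (fun i => if i < 48 then pvSlotOn regs i else 0)) ([], none)).1
      = pvScanRuns ((PySem.List.pyRange 0 48 1).map (pvSlotOn regs)) 0 := by
    have h49 := pvBridge (fun i => if i < 48 then pvSlotOn regs i else 0) 49 0 [] none
    norm_num at h49
    rw [h49]
    have hsplit : (PySem.List.pyRange 0 49 1).map (fun i => if i < 48 then pvSlotOn regs i else 0)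
        = (PySem.List.pyRange 0 48 1).map (pvSlotOn regs) ++ [(0:Int)] := by
      rw [show (49:Int) = 48 + 1 by norm_num,
          PySem.List.pyRange_one_succ_right (by norm_num), List.map_append]
      refine congrArg₂ _ ?_ ?_
      · exact List.map_congr_left (fun i hi => by
          have := (PySem.List.mem_pyRange_one.mp hi).2
          simp [this])
      · simp
    have hgood : ∀ b ∈ (PySem.List.pyRange 0 48 1).map (pvSlotOn regs), b = 0 ∨ b = 1 := by
      intro b hb
      rcases List.mem_map.mp hb with ⟨s, _, rfl⟩
      exact pvSlotOn_bit regs s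
    rw [hsplit, (pvMain _ hgood).1 0 []]
    simp
  rw [hkey]

-- ===== VERDICT (by name: the statement is the Claim_ definition above) =====
theorem decodeScheduleDay_py_spec : Claim_equal_decodeScheduleDay_py := by
  intro reg0 reg1 reg2 _
  show decodeScheduleDay_py reg0 reg1 reg2 = decodeScheduleDay_py_alt reg0 reg1 reg2
  exact pvCore [PySem.Int.band reg0 0xFFFF, PySem.Int.band reg1 0xFFFF, PySem.Int.band reg2 0xFFFF]
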